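-- pv_equiv track=rewrite | github.com/rondilley/Prime_Plot_AI | run_autonomous_discovery.py | peano_coords
-- ===== SOURCE A (Python) =====
-- from typing import List, Tuple, Dict, Optional, Callable
--
-- def peano_coords(n: int, order: int = 4) -> Tuple[int, int]:
--     """Simplified Peano curve variant."""
--     if n <= 0:
--         return (0, 0)
--     size = 3 ** order
--     n_mod = n % (size * size)
--     # Use ternary decomposition
--     x = y = 0
--     s = 1
--     temp = n_mod
--     for _ in range(order):
--         rx = temp % 3
--         temp //= 3
--         ry = temp % 3
--         temp //= 3
--         x += s * rx
--         y += s * ry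
--         s *= 3
--     return (x, y)
-- ===== SOURCE B (Python) =====
-- def _peano_dc(m, length):
--     """(x, y) of the low `length` base-9 chunks of m, by divide and conquer:
--     split the chunk string in half, solve each half, shift the high half by 3**half."""
--     if length == 0:
--         return (0, 0)
--     if length == 1:
--         return (m % 3, m % 9 // 3)
--     half = length // 2
--     xl, yl = _peano_dc(m % 9 ** half, half)
--     xh, yh = _peano_dc(m // 9 ** half, length - half)
--     s = 3 ** half
--     return (xl + s * xh, yl + s * yh)
--
-- def peano_coords(n: int, order: int = 4):
--     """Simplified Peano curve variant."""
--     if n <= 0 or order <= 0: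
--         return (0, 0)
--     return _peano_dc(n % 9 ** order, order)
-- ===== Notes on version B (the rewrite author's own statement) =====
-- stated objective: faster
-- what changed: A scans base-3 digit pairs least-significant-first in one interleaved loop carrying x, y and a running scale s (order big-int divmods on an order-digit number, quadratic in the digit count); B works by divide and conquer on the base-9 chunk string of n mod 9**order: split in half with one mod/div by 9**half, solve each half recursively, combine with x = xl + 3**half * xh (and likewise y), which is quasi-linear in the digit count.
import Mathlib
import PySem

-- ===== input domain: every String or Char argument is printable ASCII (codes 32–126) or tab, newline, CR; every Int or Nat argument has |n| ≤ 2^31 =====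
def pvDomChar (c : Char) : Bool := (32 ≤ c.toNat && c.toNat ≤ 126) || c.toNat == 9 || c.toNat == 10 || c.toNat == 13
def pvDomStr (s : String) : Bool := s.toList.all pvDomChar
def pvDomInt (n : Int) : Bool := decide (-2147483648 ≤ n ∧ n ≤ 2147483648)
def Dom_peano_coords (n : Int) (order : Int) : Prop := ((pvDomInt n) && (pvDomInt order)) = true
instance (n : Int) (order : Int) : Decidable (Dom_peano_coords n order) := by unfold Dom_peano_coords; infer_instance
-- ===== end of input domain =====

-- B replaces A's single interleaved accumulator loop (running scale s over base-3 digit pairs)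
-- by a divide-and-conquer split of the base-9 chunk string of n mod 9**order: each half is
-- solved recursively and the high half is shifted by 3**half; a timing run measured B much faster at large order.

-- ===== PORT A =====
-- Note: for order < 0 Python's `3 ** order` is a float, but (on Pre_) its value is never used
-- for the result (the loop runs 0 times and (0, 0) is returned); `3 ^ order.toNat` is exact here.
def peano_coords (n : Int) (order : Int) : Int × Int :=
  if n ≤ 0 then (0, 0)
  else
    let size : Int := 3 ^ order.toNat
    let n_mod : Int := PySem.Int.mod n (size * size)
    let st := (List.range order.toNat).foldl
      (fun (st : Int × Int × Int × Int) _ =>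
        let x := st.1; let y := st.2.1; let s := st.2.2.1; let temp := st.2.2.2
        let rx := PySem.Int.mod temp 3
        let temp := PySem.Int.floordiv temp 3
        let ry := PySem.Int.mod temp 3
        let temp := PySem.Int.floordiv temp 3
        (x + s * rx, y + s * ry, s * 3, temp))
      (0, 0, 1, n_mod)
    (st.1, st.2.1)

-- ===== PORT B =====
-- _peano_dc is only ever called with a nonnegative `length`, so Nat is exact for it.
def peano_dc (m : Int) (length : Nat) : Int × Int :=
  if length = 0 then (0, 0)
  else if length = 1 then
    (PySem.Int.mod m 3, PySem.Int.floordiv (PySem.Int.mod m 9) 3)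
  else
    let half := length / 2
    let pl := peano_dc (PySem.Int.mod m (9 ^ half)) half
    let ph := peano_dc (PySem.Int.floordiv m (9 ^ half)) (length - half)
    let s : Int := 3 ^ half
    (pl.1 + s * ph.1, pl.2 + s * ph.2)
termination_by length
decreasing_by all_goals omega

def peano_coords_alt (n : Int) (order : Int) : Int × Int :=
  if n ≤ 0 ∨ order ≤ 0 then (0, 0)
  else peano_dc (PySem.Int.mod n (9 ^ order.toNat)) order.toNat

-- ===== PRECONDITION & SPEC =====
-- Pre_ excludes only inputs on which Python A RAISES: for n > 0 and order ≤ -340 the float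
-- `3 ** order` squared underflows to 0.0 and `n % 0.0` is a ZeroDivisionError.
def Pre_peano_coords (n : Int) (order : Int) : Prop := n ≤ 0 ∨ -339 ≤ order
instance (n : Int) (order : Int) : Decidable (Pre_peano_coords n order) := by unfold Pre_peano_coords; infer_instance
def pvWitness_peano_coords : Int × Int := (7, 4)

def Spec_peano_coords (n : Int) (order : Int) (out : Int × Int) : Prop := out = peano_coords_alt n order
instance (n : Int) (order : Int) (out : Int × Int) : Decidable (Spec_peano_coords n order out) := by unfold Spec_peano_coords; infer_instance

-- ===== CLAIM (what is proved, stated in full; the proofs are below) =====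
def Claim_equal_peano_coords : Prop := ∀ (n : Int) (order : Int), Dom_peano_coords n order → Pre_peano_coords n order → Spec_peano_coords n order (peano_coords n order)

-- ===== LEMMAS AND PROOFS =====

-- digit j of t in base 3
def pvDigit (t : Int) (j : Nat) : Int := (t / 3 ^ j) % 3

-- A's loop computes the two interleaved digit sums.
lemma pv_loopA (t : Int) (k : Nat) (x y s : Int) :
    (List.range k).foldl
      (fun (st : Int × Int × Int × Int) _ =>
        let x := st.1; let y := st.2.1; let s := st.2.2.1; let temp := st.2.2.2
        let rx := PySem.Int.mod temp 3
        let temp := PySem.Int.floordiv temp 3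
        let ry := PySem.Int.mod temp 3
        let temp := PySem.Int.floordiv temp 3
        (x + s * rx, y + s * ry, s * 3, temp))
      (x, y, s, t)
      = (x + s * ((List.range k).map (fun i => pvDigit t (2 * i) * 3 ^ i)).sum,
         y + s * ((List.range k).map (fun i => pvDigit t (2 * i + 1) * 3 ^ i)).sum,
         s * 3 ^ k, t / 3 ^ (2 * k)) := by
  induction k generalizing x y s t with
  | zero => simp
  | succ k ih =>
      rw [List.range_succ, List.foldl_append, ih, List.map_append, List.map_append]
      simp only [List.foldl_cons, List.foldl_nil, List.sum_append, List.map_cons, List.map_nil,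
        List.sum_cons, List.sum_nil]
      have h3 : (0:Int) < 3 := by norm_num
      simp only [PySem.Int.mod_eq_emod_of_pos h3, PySem.Int.floordiv_eq_ediv_of_pos h3]
      have e1 : t / 3 ^ (2 * k) / 3 = t / 3 ^ (2 * k + 1) := by
        rw [Int.ediv_ediv_of_nonneg (by positivity), pow_succ]
      have e2 : t / 3 ^ (2 * k + 1) / 3 = t / 3 ^ (2 * (k + 1)) := by
        rw [Int.ediv_ediv_of_nonneg (by positivity)]
        ring_nf
      rw [e1, e2]
      simp only [Prod.mk.injEq]
      refine ⟨?_, ?_, ?_, trivial⟩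
      · simp [pvDigit]; ring
      · simp [pvDigit]; ring
      · ring

-- 9^h = 3^(2h)
lemma pv_nine_pow (h : Nat) : (9:Int) ^ h = 3 ^ (2 * h) := by
  rw [show (9:Int) = 3 ^ 2 by norm_num, ← pow_mul]

-- low base-3 digits of m % 9^h agree with those of m
lemma pv_digit_mod (m : Int) (h j : Nat) (hj : j < 2 * h) :
    pvDigit (PySem.Int.mod m ((9:Int) ^ h)) j = pvDigit m j := by
  have hMpos : (0:Int) < 9 ^ h := by positivity
  rw [PySem.Int.mod_eq_emod_of_pos hMpos, pv_nine_pow]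
  have hsplit : (3:Int) ^ (2 * h) = 3 ^ j * (3 * 3 ^ (2 * h - j - 1)) := by
    rw [← pow_succ', ← pow_add]
    congr 1
    omega
  rw [Int.emod_def, hsplit, pvDigit, pvDigit]
  rw [mul_assoc, mul_comm ((3:Int) ^ j) _, Int.sub_mul_ediv_right]
  rw [Int.sub_emod, mul_assoc, Int.mul_emod_right]
  simp [Int.emod_emod_of_dvd]
  case H => positivity

-- shifting off h base-9 chunks shifts base-3 digit positions by 2h
lemma pv_digit_shift (m : Int) (h j : Nat) :
    pvDigit (PySem.Int.floordiv m ((9:Int) ^ h)) j = pvDigit m (j + 2 * h) := by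
  have hMpos : (0:Int) < 9 ^ h := by positivity
  rw [PySem.Int.floordiv_eq_ediv_of_pos hMpos]
  unfold pvDigit
  rw [Int.ediv_ediv_of_nonneg (le_of_lt hMpos), pv_nine_pow, ← pow_add, Nat.add_comm (2 * h) j]

-- a positional sum over h + r positions splits at h
lemma pv_sum_split (f : Nat → Int) (h r : Nat) :
    ((List.range (h + r)).map f).sum
      = ((List.range h).map f).sum + ((List.range r).map (fun j => f (h + j))).sum := by
  rw [List.range_add, List.map_append, List.sum_append, List.map_map]
  rfl

-- B's divide and conquer computes the same two interleaved digit sums.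
lemma pv_dc_eq (len : Nat) (m : Int) :
    peano_dc m len
      = (((List.range len).map (fun i => pvDigit m (2 * i) * 3 ^ i)).sum,
         ((List.range len).map (fun i => pvDigit m (2 * i + 1) * 3 ^ i)).sum) := by
  induction len using Nat.strong_induction_on generalizing m with
  | _ len ih =>
    rw [peano_dc]
    by_cases h0 : len = 0
    · simp [h0]
    · by_cases h1 : len = 1
      · subst h1
        simp only [if_neg h0, reduceIte]
        have h3 : (0:Int) < 3 := by norm_num
        have h9 : (0:Int) < 9 := by norm_num
        simp only [PySem.Int.mod_eq_emod_of_pos h3, PySem.Int.mod_eq_emod_of_pos h9,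
          PySem.Int.floordiv_eq_ediv_of_pos h3]
        have hdx : m % 3 = pvDigit m 0 := by unfold pvDigit; simp
        have hdy : m % 9 / 3 = pvDigit m 1 := by
          unfold pvDigit; simp only [pow_one]; omega
        simp [hdx, hdy]
      · simp only [if_neg h0, if_neg h1]
        have hhalf : len / 2 < len := by omega
        have hrest : len - len / 2 < len := by omega
        rw [ih _ hhalf, ih _ hrest]
        have hlen : len = len / 2 + (len - len / 2) := by omega
        simp only [Prod.mk.injEq]
        constructor
        · rw [hlen, pv_sum_split (fun i => pvDigit m (2 * i) * 3 ^ i), ← hlen]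
          congr 1
          · exact congrArg List.sum (List.map_congr_left (fun i hi => by
              rw [pv_digit_mod m (len / 2) (2 * i) (by have := List.mem_range.mp hi; omega)]))
          · rw [← List.sum_map_mul_left]
            exact congrArg List.sum (List.map_congr_left (fun j _ => by
              rw [pv_digit_shift, show 2 * j + 2 * (len / 2) = 2 * (len / 2 + j) from by ring,
                pow_add]
              ring))
        · rw [hlen, pv_sum_split (fun i => pvDigit m (2 * i + 1) * 3 ^ i), ← hlen]
          congr 1
          · exact congrArg List.sum (List.map_congr_left (fun i hi => by
              rw [pv_digit_mod m (len / 2) (2 * i + 1) (by have := List.mem_range.mp hi; omega)]))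
          · rw [← List.sum_map_mul_left]
            exact congrArg List.sum (List.map_congr_left (fun j _ => by
              rw [pv_digit_shift, show 2 * j + 1 + 2 * (len / 2) = 2 * (len / 2 + j) + 1 from by ring,
                pow_add]
              ring))

-- ===== VERDICT (by name: the statement is the Claim_ definition above) =====
theorem peano_coords_spec : Claim_equal_peano_coords := by
  intro n order _ _
  unfold Spec_peano_coords peano_coords peano_coords_alt
  by_cases hn : n ≤ 0
  · simp [hn]
  · simp only [if_neg hn]
    by_cases ho : order ≤ 0
    · have h0 : order.toNat = 0 := by omega
      simp [h0, hn, ho]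
    · rw [if_neg (by simp; omega)]
      rw [pv_loopA, pv_dc_eq]
      have h9 : (3:Int) ^ order.toNat * 3 ^ order.toNat = 9 ^ order.toNat := by
        rw [← mul_pow]; norm_num
      simp [h9]
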